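-- pv_equiv track=rewrite | github.com/CaptMD-11/VStats | Code/PythonCode/__init__.py | compute_mode
-- ===== SOURCE A (Python) =====
-- def compute_mode(input_data):
--     mode_finder = []
--     mode = 0
--
--     for x in range(len(input_data)):
--         mode_finder.append(1)
--
--     for i in range(len(input_data)):
--         for j in range(len(input_data)):
--             if input_data[i] == input_data[j]:
--                 mode_finder[i] = mode_finder[i] + 1
--
--     c_max_temp = mode_finder[0]
--
--     for x in range(len(mode_finder)):
--         if mode_finder[x] > c_max_temp:
--             c_max_temp = mode_finder[x]
--
--     temp_index = 0
--
--     for x in range(len(mode_finder)):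
--         if mode_finder[x] == c_max_temp:
--             temp_index = x
--
--     mode = input_data[temp_index]
--
--     return mode
-- ===== SOURCE B (Python) =====
-- def compute_mode(input_data):
--     # One forward pass: running counts in a dict; a running count that ties or
--     # beats the current best takes over, which reproduces the last-index
--     # tie-break of the quadratic original.
--     counts = {}
--     best_v = None
--     best_c = 0
--     for v in input_data:
--         c = counts.get(v, 0) + 1
--         counts[v] = c
--         if c >= best_c:
--             best_v = v
--             best_c = c
--     return best_v
-- ===== Notes on version B (the rewrite author's own statement) =====
-- stated objective: faster
-- what changed: Replaced the quadratic all-pairs frequency table plus three index scans by a single forward pass that keeps running counts in a dict and updates the current best on every tie-or-record, which yields the same last-index tie-break.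
-- outside the precondition, e.g. on compute_mode([]): A raises IndexError, B returns None
import Mathlib
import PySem

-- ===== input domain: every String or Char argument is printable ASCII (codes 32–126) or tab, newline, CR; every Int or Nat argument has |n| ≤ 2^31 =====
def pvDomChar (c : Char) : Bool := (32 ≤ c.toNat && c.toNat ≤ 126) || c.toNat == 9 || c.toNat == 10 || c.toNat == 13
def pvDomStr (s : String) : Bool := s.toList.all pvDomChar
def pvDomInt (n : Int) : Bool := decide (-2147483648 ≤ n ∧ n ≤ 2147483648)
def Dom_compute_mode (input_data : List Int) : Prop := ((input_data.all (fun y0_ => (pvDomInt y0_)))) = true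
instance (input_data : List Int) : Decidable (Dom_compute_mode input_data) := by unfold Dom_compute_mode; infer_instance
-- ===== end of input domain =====

-- B replaces A's quadratic all-pairs frequency table and three index scans by one
-- forward pass keeping running counts in a dict; same value, same last-index tie-break.

-- ===== PORT A =====
def compute_mode (input_data : List Int) : Int :=
  let n := input_data.length
  let mf0 : List Int := (List.range n).foldl (fun acc _ => acc ++ [1]) []
  let mf := (List.range n).foldl (fun mf i =>
      (List.range n).foldl (fun mf' j =>
        if input_data.getD i 0 = input_data.getD j 0
        then mf'.set i (mf'.getD i 0 + 1) else mf') mf) mf0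
  -- Python's mode_finder[0] raises IndexError on empty input; mf.getD 0 0 is only
  -- reached under Pre_compute_mode (input_data ≠ []), where 0 is in range.
  let c0 := mf.getD 0 0
  let cmax := (List.range mf.length).foldl
      (fun c x => if mf.getD x 0 > c then mf.getD x 0 else c) c0
  let ti := (List.range mf.length).foldl
      (fun t x => if mf.getD x 0 = cmax then x else t) 0
  input_data.getD ti 0

-- ===== PORT B =====
-- loop body of Source B (counts in a dict, best value/count updated on tie-or-record)
def bStep (st : PySem.Dict Int Int × Int × Int) (v : Int) :
    PySem.Dict Int Int × Int × Int :=
  let c := st.1.getD v 0 + 1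
  let counts := st.1.insert v c
  if c ≥ st.2.2 then (counts, v, c) else (counts, st.2.1, st.2.2)

-- Python's best_v starts as None and is returned only on empty input (outside
-- Pre_compute_mode); 0 stands in for that unreachable None.
def compute_mode_alt (input_data : List Int) : Int :=
  (input_data.foldl bStep (PySem.Dict.empty, 0, 0)).2.1

-- ===== PRECONDITION & SPEC =====
-- A evaluates mode_finder[0], which raises IndexError on the empty list; Pre_ excludes it.
def Pre_compute_mode (input_data : List Int) : Prop := input_data ≠ []
instance (input_data : List Int) : Decidable (Pre_compute_mode input_data) := by
  unfold Pre_compute_mode; infer_instance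
def pvWitness_compute_mode : List Int := [1, 2, 2]

def Spec_compute_mode (input_data : List Int) (out : Int) : Prop := out = compute_mode_alt input_data
instance (input_data : List Int) (out : Int) : Decidable (Spec_compute_mode input_data out) := by unfold Spec_compute_mode; infer_instance

-- ===== CLAIM (what is proved, stated in full; the proofs are below) =====
def Claim_equal_compute_mode : Prop := ∀ (input_data : List Int), Dom_compute_mode input_data → Pre_compute_mode input_data → Spec_compute_mode input_data (compute_mode input_data)



-- ===== LEMMAS AND PROOFS =====

-- total count (as Int) of the value at index i
def cI (xs : List Int) (i : Nat) : Int := (xs.count (xs.getD i 0) : Int)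
-- running count: occurrences of xs[i] among xs[0..i]
def rcI (xs : List Int) (i : Nat) : Int := ((xs.take (i + 1)).count (xs.getD i 0) : Int)
-- maximum of cI over all indices, seeded with cI 0 (A's c_max loop minus the uniform +1)
def maxC (xs : List Int) : Int :=
  (List.range xs.length).foldl (fun m x => max m (cI xs x)) (cI xs 0)
-- maximum of the running counts, seeded with 0 (B's best_c)
def bcF (xs : List Int) : Int :=
  (List.range xs.length).foldl (fun m x => max m (rcI xs x)) 0
-- last index whose total count is maximal (A's temp_index)
def lastIdx (xs : List Int) : Nat :=
  ((List.range xs.length).filter (fun i => decide (cI xs i = maxC xs))).getLastD 0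
-- last index whose running count equals bcF (where B last updated best_v)
def lastRc (xs : List Int) : Nat :=
  ((List.range xs.length).filter (fun i => decide (rcI xs i = bcF xs))).getLastD 0

-- ---------- generic list lemmas ----------

theorem lastD_cons (a d : Nat) (l : List Nat) : (a :: l).getLastD d = l.getLastD a := by
  cases l with
  | nil => rfl
  | cons b t => simp [List.getLastD]

theorem lastD_concat : ∀ (l : List Nat) (a d : Nat), (l ++ [a]).getLastD d = a := by
  intro l
  induction l with
  | nil => intro a d; rfl
  | cons b t ih =>
    intro a d
    rw [List.cons_append, lastD_cons]
    exact ih a b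

theorem getLastD_mem (l : List Nat) (d : Nat) (h : l ≠ []) : l.getLastD d ∈ l := by
  induction l generalizing d with
  | nil => cases h rfl
  | cons a t ih =>
    rw [lastD_cons]
    cases t with
    | nil => simp [List.getLastD]
    | cons b u => exact List.mem_cons_of_mem a (ih a (by simp))

theorem foldl_if_last (P : Nat → Prop) [DecidablePred P] :
    ∀ (L : List Nat) (t0 : Nat),
      L.foldl (fun t x => if P x then x else t) t0
        = (L.filter (fun x => decide (P x))).getLastD t0 := by
  intro L
  induction L with
  | nil => intro t0; rfl
  | cons a L ih =>
    intro t0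
    simp only [List.foldl_cons, List.filter_cons]
    by_cases h : P a
    · rw [if_pos h, ih a, if_pos (decide_eq_true h), lastD_cons]
    · rw [if_neg h, ih t0]
      simp [h]

theorem le_foldl_max (f : Nat → Int) :
    ∀ (L : List Nat) (a : Int), a ≤ L.foldl (fun m x => max m (f x)) a := by
  intro L
  induction L with
  | nil => intro a; simp
  | cons b L ih => intro a; exact le_trans (le_max_left a (f b)) (ih _)

theorem foldl_max_le_of_mem (f : Nat → Int) :
    ∀ (L : List Nat) (a : Int) (x : Nat), x ∈ L →
      f x ≤ L.foldl (fun m x => max m (f x)) a := by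
  intro L
  induction L with
  | nil => intro a x hx; cases hx
  | cons b L ih =>
    intro a x hx
    rcases List.mem_cons.mp hx with h | h
    · subst h; exact le_trans (le_max_right a (f x)) (le_foldl_max f L _)
    · exact ih _ x h

theorem foldl_max_cases (f : Nat → Int) :
    ∀ (L : List Nat) (a : Int),
      L.foldl (fun m x => max m (f x)) a = a ∨
        ∃ x ∈ L, L.foldl (fun m x => max m (f x)) a = f x := by
  intro L
  induction L with
  | nil => intro a; left; rfl
  | cons b L ih =>
    intro a
    rcases ih (max a (f b)) with h | ⟨x, hx, hfx⟩
    · by_cases hab : f b ≤ a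
      · left; simp only [List.foldl_cons]; rw [h, max_eq_left hab]
      · right
        refine ⟨b, List.mem_cons_self .., ?_⟩
        simp only [List.foldl_cons]; rw [h, max_eq_right (not_le.mp hab).le]
    · right; exact ⟨x, List.mem_cons_of_mem _ hx, hfx⟩

theorem foldl_max_le (f : Nat → Int) (B : Int) :
    ∀ (L : List Nat) (a : Int), a ≤ B → (∀ x ∈ L, f x ≤ B) →
      L.foldl (fun m x => max m (f x)) a ≤ B := by
  intro L
  induction L with
  | nil => intro a ha _; simpa using ha
  | cons b L ih =>
    intro a ha hL
    exact ih _ (max_le ha (hL b (by simp))) (fun x hx => hL x (by simp [hx]))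

theorem foldl_max_shift (f : Nat → Int) :
    ∀ (L : List Nat) (a : Int),
      L.foldl (fun m x => max m (1 + f x)) (1 + a)
        = 1 + L.foldl (fun m x => max m (f x)) a := by
  intro L
  induction L with
  | nil => intro a; rfl
  | cons b L ih =>
    intro a
    simp only [List.foldl_cons]
    rw [max_add_add_left]
    exact ih (max a (f b))

theorem map_range_getD (xs : List Int) :
    (List.range xs.length).map (fun j => xs.getD j 0) = xs := by
  apply List.ext_getElem
  · simp
  · intro i h1 h2
    simp only [List.getElem_map, List.getElem_range]
    exact List.getD_eq_getElem xs 0 h2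

theorem countP_range_getD (xs : List Int) (p : Int → Bool) :
    (List.range xs.length).countP (fun j => p (xs.getD j 0)) = xs.countP p := by
  conv_rhs => rw [← map_range_getD xs]
  rw [List.countP_map]
  rfl

theorem getD_append_left (l l' : List Int) (i : Nat) (h : i < l.length) :
    (l ++ l').getD i 0 = l.getD i 0 := by
  rw [List.getD_eq_getElem?_getD, List.getD_eq_getElem?_getD, List.getElem?_append_left h]

theorem getD_append_self (q : List Int) (v : Int) :
    (q ++ [v]).getD q.length 0 = v := by
  simp [List.getD]

theorem getLastD_filter_range_lt (n : Nat) (P : Nat → Bool) (hn : 0 < n) :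
    ((List.range n).filter P).getLastD 0 < n := by
  by_cases hl : (List.range n).filter P = []
  · rw [hl]; exact hn
  · exact List.mem_range.mp (List.mem_of_mem_filter (getLastD_mem _ 0 hl))

theorem getLastD_filter_range_spec (n : Nat) (P : Nat → Bool)
    (hex : ∃ i, i < n ∧ P i = true) :
    P (((List.range n).filter P).getLastD 0) = true ∧
    (∀ j, (((List.range n).filter P).getLastD 0) < j → j < n → P j = false) := by
  induction n with
  | zero => obtain ⟨i, hi, _⟩ := hex; omega
  | succ n ih =>
    rw [List.range_succ, List.filter_append]
    by_cases hPn : P n = true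
    · simp only [List.filter_cons, hPn, List.filter_nil, if_true]
      rw [lastD_concat]
      exact ⟨hPn, fun j hj hjn => by omega⟩
    · have hPn' : P n = false := by simpa using hPn
      simp only [List.filter_cons, hPn', Bool.false_eq_true, List.filter_nil,
        List.append_nil, ite_false]
      have hex' : ∃ i, i < n ∧ P i = true := by
        obtain ⟨i, hi, hp⟩ := hex
        refine ⟨i, ?_, hp⟩
        rcases Nat.lt_succ_iff_lt_or_eq.mp hi with h | h
        · exact h
        · subst h; rw [hp] at hPn'; cases hPn'
      obtain ⟨h1, h2⟩ := ih hex'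
      refine ⟨h1, ?_⟩
      intro j hj hjn
      rcases Nat.lt_succ_iff_lt_or_eq.mp hjn with h | h
      · exact h2 j hj h
      · subst h; exact hPn'

theorem getLastD_filter_range_eq (n : Nat) (P : Nat → Bool) (r : Nat)
    (hr : P r = true) (hrn : r < n) (hmax : ∀ j, r < j → j < n → P j = false) :
    ((List.range n).filter P).getLastD 0 = r := by
  induction n with
  | zero => omega
  | succ n ih =>
    rw [List.range_succ, List.filter_append]
    by_cases h : r = n
    · subst h
      simp only [List.filter_cons, hr, List.filter_nil, if_true]
      exact lastD_concat _ _ _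
    · have hrn' : r < n := by omega
      have hPn : P n = false := hmax n (by omega) (by omega)
      simp only [List.filter_cons, hPn, Bool.false_eq_true, List.filter_nil,
        List.append_nil, ite_false]
      exact ih hrn' (fun j hj hjn => hmax j hj (by omega))

-- ---------- A-side characterisation ----------

theorem mf0_eq (n : Nat) : ∀ acc : List Int,
    (List.range n).foldl (fun acc _ => acc ++ [1]) acc = acc ++ List.replicate n 1 := by
  induction n with
  | zero => intro acc; simp
  | succ n ih =>
    intro acc
    rw [List.range_succ, List.foldl_append, ih acc]
    simp [List.replicate_succ']

theorem innerA (xs : List Int) (i : Nat) :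
    ∀ (L : List Nat) (mf : List Int), i < mf.length →
      L.foldl (fun mf' j => if xs.getD i 0 = xs.getD j 0
          then mf'.set i (mf'.getD i 0 + 1) else mf') mf
        = mf.set i (mf.getD i 0
            + (L.countP (fun j => decide (xs.getD i 0 = xs.getD j 0)) : Int)) := by
  intro L
  induction L with
  | nil =>
    intro mf h
    simp only [List.foldl_nil, List.countP_nil, Nat.cast_zero, add_zero]
    rw [List.getD_eq_getElem mf 0 h]
    simp
  | cons j L ih =>
    intro mf h
    simp only [List.foldl_cons, List.countP_cons]
    by_cases hj : xs.getD i 0 = xs.getD j 0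
    · rw [if_pos hj, ih _ (by simpa using h)]
      have hlen' : i < (mf.set i (mf.getD i 0 + 1)).length := by simpa using h
      rw [List.getD_eq_getElem _ 0 hlen', List.getElem_set_self hlen', List.set_set,
          List.getD_eq_getElem mf 0 h]
      congr 1
      push_cast
      split_ifs with hc
      · ring
      · exact absurd hj (by simpa using hc)
    · rw [if_neg hj, ih _ h]
      congr 1
      push_cast
      split_ifs with hc
      · exact absurd (by simpa using hc) hj
      · ring

theorem outerA (xs : List Int) :
    ∀ k, k ≤ xs.length →
      (List.range k).foldl (fun mf i =>
          (List.range xs.length).foldl (fun mf' j =>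
            if xs.getD i 0 = xs.getD j 0
            then mf'.set i (mf'.getD i 0 + 1) else mf') mf)
        (List.replicate xs.length 1)
      = (List.range xs.length).map (fun p => if p < k then 1 + cI xs p else (1 : Int)) := by
  intro k
  induction k with
  | zero =>
    intro _
    simp only [List.range_zero, List.foldl_nil]
    apply List.ext_getElem
    · simp
    · intro p h1 h2
      simp
  | succ k ih =>
    intro hk
    have hkn : k < xs.length := Nat.lt_of_succ_le hk
    rw [List.range_succ, List.foldl_append, ih (Nat.le_of_lt hkn)]
    simp only [List.foldl_cons, List.foldl_nil]
    rw [innerA xs k _ _ (by simpa using hkn)]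
    have hget : ((List.range xs.length).map
        (fun p => if p < k then 1 + cI xs p else (1 : Int))).getD k 0 = 1 := by
      rw [List.getD_eq_getElem _ 0 (by simpa using hkn)]
      simp
    rw [hget]
    have hcnt : ((List.range xs.length).countP
        (fun j => decide (xs.getD k 0 = xs.getD j 0)) : Int) = cI xs k := by
      unfold cI
      norm_cast
      have hpred : (fun j => decide (xs.getD k 0 = xs.getD j 0))
          = (fun j => ((· == xs.getD k 0) (xs.getD j 0))) := by
        funext j
        exact decide_eq_decide.mpr eq_comm
      rw [hpred, countP_range_getD xs (· == xs.getD k 0)]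
      rfl
    rw [hcnt]
    apply List.ext_getElem
    · simp
    · intro p h1 h2
      have hp : p < xs.length := by simpa using h2
      rw [List.getElem_set]
      simp only [List.getElem_map, List.getElem_range]
      by_cases hpk : k = p
      · subst hpk
        simp [add_comm]
      · by_cases hpk2 : p < k
        · simp [hpk, hpk2, Nat.lt_succ_of_lt hpk2]
        · have h3 : ¬ p < k + 1 := by omega
          simp [hpk, hpk2, h3]

theorem A_eq_ref (xs : List Int) (h : xs ≠ []) :
    compute_mode xs = xs.getD (lastIdx xs) 0 := by
  have hn : 0 < xs.length := List.length_pos_iff.mpr h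
  dsimp only [compute_mode]
  have h0 : (List.range xs.length).foldl (fun acc _ => acc ++ [1]) ([] : List Int)
      = List.replicate xs.length 1 := by simpa using mf0_eq xs.length []
  rw [h0, outerA xs xs.length le_rfl]
  have hmap : (List.range xs.length).map
        (fun p => if p < xs.length then 1 + cI xs p else (1 : Int))
      = (List.range xs.length).map (fun p => 1 + cI xs p) := by
    apply List.map_congr_left
    intro p hp
    simp [List.mem_range.mp hp]
  rw [hmap]
  set M := (List.range xs.length).map (fun p => (1 : Int) + cI xs p) with hM
  have hlen : M.length = xs.length := by simp [hM]
  have hgetM : ∀ x, x < xs.length → M.getD x 0 = 1 + cI xs x := by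
    intro x hx
    rw [hM, List.getD_eq_getElem _ 0 (by simpa using hx)]
    simp
  have hc0 : M.getD 0 0 = 1 + cI xs 0 := hgetM 0 hn
  have hcmax : (List.range M.length).foldl
      (fun c x => if M.getD x 0 > c then M.getD x 0 else c) (M.getD 0 0)
      = 1 + maxC xs := by
    rw [hlen, hc0]
    have hcongr : (List.range xs.length).foldl
        (fun c x => if M.getD x 0 > c then M.getD x 0 else c) (1 + cI xs 0)
        = (List.range xs.length).foldl
        (fun c x => max c (1 + cI xs x)) (1 + cI xs 0) := by
      apply PySem.List.foldl_congr_mem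
      intro acc x hx
      rw [hgetM x (List.mem_range.mp hx)]
      by_cases hle : 1 + cI xs x ≤ acc
      · rw [if_neg (not_lt.mpr hle), max_eq_left hle]
      · rw [if_pos (not_le.mp hle), max_eq_right (not_le.mp hle).le]
    rw [hcongr, foldl_max_shift]
    rfl
  rw [hcmax]
  have hti : (List.range M.length).foldl
      (fun t x => if M.getD x 0 = 1 + maxC xs then x else t) 0 = lastIdx xs := by
    rw [hlen, foldl_if_last (fun x => M.getD x 0 = 1 + maxC xs)]
    unfold lastIdx
    congr 1
    apply List.filter_congr
    intro x hx
    have hg := hgetM x (List.mem_range.mp hx)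
    rw [hg]
    simp [add_right_inj]
  rw [hti]

-- ---------- B-side characterisation ----------

theorem rcI_append_lt (q : List Int) (v : Int) (i : Nat) (h : i < q.length) :
    rcI (q ++ [v]) i = rcI q i := by
  unfold rcI
  rw [List.take_append_of_le_length (by omega), getD_append_left q [v] i h]

theorem rcI_append_self (q : List Int) (v : Int) :
    rcI (q ++ [v]) q.length = (q.count v : Int) + 1 := by
  unfold rcI
  rw [getD_append_self, List.take_of_length_le (by simp)]
  push_cast [List.count_append]
  simp

theorem bcF_append (q : List Int) (v : Int) :
    bcF (q ++ [v]) = max (bcF q) ((q.count v : Int) + 1) := by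
  unfold bcF
  have hlen : (q ++ [v]).length = q.length + 1 := by simp
  rw [hlen, List.range_succ, List.foldl_append]
  simp only [List.foldl_cons, List.foldl_nil]
  rw [rcI_append_self]
  congr 1
  apply PySem.List.foldl_congr_mem
  intro acc x hx
  rw [rcI_append_lt q v x (List.mem_range.mp hx)]

theorem B_inv (p : List Int) :
    (∀ v : Int, (p.foldl bStep (PySem.Dict.empty, 0, 0)).1.getD v 0 = (p.count v : Int)) ∧
    (p.foldl bStep (PySem.Dict.empty, 0, 0)).2.2 = bcF p ∧
    (p ≠ [] → (p.foldl bStep (PySem.Dict.empty, 0, 0)).2.1 = p.getD (lastRc p) 0) := by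
  induction p using List.reverseRecOn with
  | nil =>
    refine ⟨?_, ?_, ?_⟩
    · intro v; simp [PySem.Dict.getD_empty]
    · simp [bcF]
    · intro hne; cases hne rfl
  | append_singleton q v ih =>
    obtain ⟨ihc, ihb, ihv⟩ := ih
    set st := q.foldl bStep (PySem.Dict.empty, 0, 0) with hst
    by_cases hge : st.1.getD v 0 + 1 ≥ st.2.2
    · -- tie-or-record: best becomes (v, running count of v)
      have hstep : (q ++ [v]).foldl bStep (PySem.Dict.empty, 0, 0)
          = (st.1.insert v (st.1.getD v 0 + 1), v, st.1.getD v 0 + 1) := by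
        rw [List.foldl_append, ← hst]
        simp only [List.foldl_cons, List.foldl_nil]
        unfold bStep
        rw [if_pos hge]
      have hle : bcF q ≤ (q.count v : Int) + 1 := by
        rw [← ihb, ← ihc]
        exact hge
      have hbc' : bcF (q ++ [v]) = (q.count v : Int) + 1 := by
        rw [bcF_append, max_eq_right hle]
      rw [hstep]
      refine ⟨?_, ?_, ?_⟩
      · intro u
        show (st.1.insert v (st.1.getD v 0 + 1)).getD u 0 = ((q ++ [v]).count u : Int)
        rw [PySem.Dict.getD_insert]
        by_cases huv : u = v
        · subst huv
          rw [if_pos rfl, ihc]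
          push_cast [List.count_append]
          simp
        · rw [if_neg huv, ihc]
          push_cast [List.count_append, List.count_singleton]
          simp [Ne.symm huv]
      · show st.1.getD v 0 + 1 = bcF (q ++ [v])
        rw [ihc, hbc']
      · intro _
        show v = (q ++ [v]).getD (lastRc (q ++ [v])) 0
        have hlast : lastRc (q ++ [v]) = q.length := by
          unfold lastRc
          have hlen : (q ++ [v]).length = q.length + 1 := by simp
          rw [hlen, List.range_succ, List.filter_append]
          have hpred : decide (rcI (q ++ [v]) q.length = bcF (q ++ [v])) = true := by
            simp only [decide_eq_true_eq]
            rw [rcI_append_self, hbc']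
          simp only [List.filter_cons, hpred, List.filter_nil, if_true]
          exact lastD_concat _ _ _
        rw [hlast, getD_append_self]
    · -- strictly below the best: best unchanged
      have hlt : (q.count v : Int) + 1 < bcF q := by
        have h1 := not_le.mp hge
        rwa [ihb, ihc] at h1
      have hq : q ≠ [] := by
        intro hq0
        subst hq0
        simp [bcF] at hlt
      have hbc' : bcF (q ++ [v]) = bcF q := by
        rw [bcF_append, max_eq_left (le_of_lt hlt)]
      have hstep : (q ++ [v]).foldl bStep (PySem.Dict.empty, 0, 0)
          = (st.1.insert v (st.1.getD v 0 + 1), st.2.1, st.2.2) := by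
        rw [List.foldl_append, ← hst]
        simp only [List.foldl_cons, List.foldl_nil]
        unfold bStep
        rw [if_neg hge]
      rw [hstep]
      refine ⟨?_, ?_, ?_⟩
      · intro u
        show (st.1.insert v (st.1.getD v 0 + 1)).getD u 0 = ((q ++ [v]).count u : Int)
        rw [PySem.Dict.getD_insert]
        by_cases huv : u = v
        · subst huv
          rw [if_pos rfl, ihc]
          push_cast [List.count_append]
          simp
        · rw [if_neg huv, ihc]
          push_cast [List.count_append, List.count_singleton]
          simp [Ne.symm huv]
      · show st.2.2 = bcF (q ++ [v])
        rw [hbc', ihb]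
      · intro _
        have hqn : 0 < q.length := List.length_pos_iff.mpr hq
        have hrlt : lastRc q < q.length := getLastD_filter_range_lt _ _ hqn
        have hlast : lastRc (q ++ [v]) = lastRc q := by
          unfold lastRc
          have hlen : (q ++ [v]).length = q.length + 1 := by simp
          rw [hlen, List.range_succ, List.filter_append]
          have hpred : decide (rcI (q ++ [v]) q.length = bcF (q ++ [v])) = false := by
            simp only [decide_eq_false_iff_not]
            rw [rcI_append_self, hbc']
            exact ne_of_lt hlt
          simp only [List.filter_cons, hpred, Bool.false_eq_true, List.filter_nil,
            List.append_nil, ite_false]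
          congr 1
          apply List.filter_congr
          intro x hx
          rw [rcI_append_lt q v x (List.mem_range.mp hx), hbc']
        show st.2.1 = (q ++ [v]).getD (lastRc (q ++ [v])) 0
        rw [hlast, getD_append_left q [v] (lastRc q) hrlt]
        exact ihv hq

theorem B_eq_ref (xs : List Int) (h : xs ≠ []) :
    compute_mode_alt xs = xs.getD (lastRc xs) 0 :=
  (B_inv xs).2.2 h

-- ---------- bridge: the last index with maximal running count is A's temp_index ----------

theorem rcI_le_cI (xs : List Int) (i : Nat) : rcI xs i ≤ cI xs i := by
  unfold rcI cI
  exact_mod_cast (List.take_sublist (i + 1) xs).count_le _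

theorem cI_le_maxC (xs : List Int) (i : Nat) (h : i < xs.length) : cI xs i ≤ maxC xs :=
  foldl_max_le_of_mem _ _ _ _ (List.mem_range.mpr h)

theorem exists_maxC (xs : List Int) (h : xs ≠ []) :
    ∃ i, i < xs.length ∧ cI xs i = maxC xs := by
  have hn : 0 < xs.length := List.length_pos_iff.mpr h
  rcases foldl_max_cases (cI xs) (List.range xs.length) (cI xs 0) with h0 | ⟨x, hx, hfx⟩
  · exact ⟨0, hn, h0.symm⟩
  · exact ⟨x, List.mem_range.mp hx, hfx.symm⟩

theorem rcI_eq_cI_of_lastOcc (xs : List Int) (r : Nat) (hr : r < xs.length)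
    (hlast : ∀ j, r < j → j < xs.length → xs.getD j 0 ≠ xs.getD r 0) :
    rcI xs r = cI xs r := by
  unfold rcI cI
  norm_cast
  set a := xs.getD r 0 with ha
  have hz : (xs.drop (r + 1)).count a = 0 := by
    rw [List.count_eq_zero]
    intro hmem
    obtain ⟨m, hm, heq⟩ := List.mem_iff_getElem.mp hmem
    have hmlen : m < xs.length - (r + 1) := by simpa using hm
    have hlt : r + 1 + m < xs.length := by omega
    rw [List.getElem_drop] at heq
    exact hlast (r + 1 + m) (by omega) hlt
      (by rw [List.getD_eq_getElem xs 0 hlt]; exact heq)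
  conv_rhs => rw [← List.take_append_drop (r + 1) xs]
  rw [List.count_append, hz]
  omega

theorem bcF_eq_maxC (xs : List Int) (h : xs ≠ []) : bcF xs = maxC xs := by
  have hn : 0 < xs.length := List.length_pos_iff.mpr h
  apply le_antisymm
  · apply foldl_max_le
    · exact le_trans (by unfold cI; positivity) (cI_le_maxC xs 0 hn)
    · intro x hx
      exact le_trans (rcI_le_cI xs x) (cI_le_maxC xs x (List.mem_range.mp hx))
  · obtain ⟨i0, hi0, hci0⟩ := exists_maxC xs h
    have hex : ∃ i, i < xs.length ∧
        (fun j => decide (xs.getD j 0 = xs.getD i0 0)) i = true := ⟨i0, hi0, by simp⟩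
    obtain ⟨h1, h2⟩ := getLastD_filter_range_spec xs.length _ hex
    set j := ((List.range xs.length).filter
        (fun j => decide (xs.getD j 0 = xs.getD i0 0))).getLastD 0 with hj
    have hjn : j < xs.length := getLastD_filter_range_lt xs.length _ hn
    have hval : xs.getD j 0 = xs.getD i0 0 := by simpa using h1
    have hlast : ∀ k, j < k → k < xs.length → xs.getD k 0 ≠ xs.getD j 0 := by
      intro k hk hkn heq
      have hfk := h2 k hk hkn
      rw [hval] at heq
      simp only [decide_eq_false_iff_not] at hfk
      exact hfk heq
    have hrc : rcI xs j = cI xs j := rcI_eq_cI_of_lastOcc xs j hjn hlast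
    have hcj : cI xs j = maxC xs := by
      unfold cI
      rw [hval]
      unfold cI at hci0
      exact hci0
    calc maxC xs = rcI xs j := by rw [hrc, hcj]
    _ ≤ bcF xs := foldl_max_le_of_mem _ _ _ _ (List.mem_range.mpr hjn)

theorem lastRc_eq_lastIdx (xs : List Int) (h : xs ≠ []) : lastRc xs = lastIdx xs := by
  have hn : 0 < xs.length := List.length_pos_iff.mpr h
  have hbc : bcF xs = maxC xs := bcF_eq_maxC xs h
  obtain ⟨i0, hi0, hci0⟩ := exists_maxC xs h
  have hex1 : ∃ i, i < xs.length ∧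
      (fun i => decide (cI xs i = maxC xs)) i = true := ⟨i0, hi0, by simp [hci0]⟩
  obtain ⟨hP1r, hmax1⟩ := getLastD_filter_range_spec xs.length _ hex1
  set r := ((List.range xs.length).filter
      (fun i => decide (cI xs i = maxC xs))).getLastD 0 with hrdef
  have hrn : r < xs.length := getLastD_filter_range_lt xs.length _ hn
  have hcr : cI xs r = maxC xs := by simpa using hP1r
  have hlastocc : ∀ k, r < k → k < xs.length → xs.getD k 0 ≠ xs.getD r 0 := by
    intro k hk hkn heq
    have hck : cI xs k = maxC xs := by
      unfold cI; rw [heq]; exact hcr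
    have h1 := hmax1 k hk hkn
    simp only [decide_eq_false_iff_not] at h1
    exact h1 hck
  have hrc : rcI xs r = bcF xs := by
    rw [rcI_eq_cI_of_lastOcc xs r hrn hlastocc, hcr, hbc]
  have hmax2 : ∀ j, r < j → j < xs.length →
      (fun i => decide (rcI xs i = bcF xs)) j = false := by
    intro j hj hjn
    simp only [decide_eq_false_iff_not]
    intro hrj
    have hcj : cI xs j = maxC xs := le_antisymm (cI_le_maxC xs j hjn)
      (by rw [← hbc, ← hrj]; exact rcI_le_cI xs j)
    have h1 := hmax1 j hj hjn
    simp only [decide_eq_false_iff_not] at h1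
    exact h1 hcj
  unfold lastRc lastIdx
  exact getLastD_filter_range_eq xs.length _ r (by simp [hrc]) hrn hmax2

-- ===== VERDICT (by name: the statement is the Claim_ definition above) =====
theorem compute_mode_spec : Claim_equal_compute_mode := by
  intro xs _ hpre
  unfold Spec_compute_mode
  rw [A_eq_ref xs hpre, B_eq_ref xs hpre, lastRc_eq_lastIdx xs hpre]
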